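-- pv_equiv track=rewrite | github.com/Kasiet2001/codewars | is_my_friend_cheating.py | remov_nb
-- ===== SOURCE A (Python) =====
-- def remov_nb(n):
--     result = []
--     seq_sum = n*(n + 1) // 2
--     for x in range(1, n + 1):
--         y = (seq_sum - x) // (x + 1)
--         if y <= n and x * y == (seq_sum - x - y):
--             result.append((x, y))
--     return result
-- ===== SOURCE B (Python) =====
-- def remov_nb(n):
--     # (x, y) is a solution iff (x+1)*(y+1) == S+1 where S = n*(n+1)//2,
--     # so enumerate divisors of s = S+1 up to sqrt(s) instead of scanning 1..n.
--     if n < 1: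
--         return []
--     s = n * (n + 1) // 2 + 1
--     small = []
--     large = []
--     i = 1
--     while i * i <= s:
--         if s % i == 0:
--             x, y = i - 1, s // i - 1
--             if 1 <= x <= n and y <= n:
--                 small.append((x, y))
--             x, y = s // i - 1, i - 1
--             if 1 <= x <= n and y <= n:
--                 large.append((x, y))
--         i += 1
--     if small and large and small[-1] == large[-1]:
--         large.pop()
--     return small + large[::-1]
-- ===== Notes on version B (the rewrite author's own statement) =====
-- stated objective: faster
-- what changed: Instead of scanning x = 1..n and testing each candidate with a floor division, B uses the identity x*y = S-x-y <=> (x+1)(y+1) = S+1 and enumerates divisor pairs of s = S+1 up to sqrt(s), emitting small-divisor pairs in ascending order and large-divisor pairs reversed (deduplicating the perfect-square middle pair).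
import Mathlib
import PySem

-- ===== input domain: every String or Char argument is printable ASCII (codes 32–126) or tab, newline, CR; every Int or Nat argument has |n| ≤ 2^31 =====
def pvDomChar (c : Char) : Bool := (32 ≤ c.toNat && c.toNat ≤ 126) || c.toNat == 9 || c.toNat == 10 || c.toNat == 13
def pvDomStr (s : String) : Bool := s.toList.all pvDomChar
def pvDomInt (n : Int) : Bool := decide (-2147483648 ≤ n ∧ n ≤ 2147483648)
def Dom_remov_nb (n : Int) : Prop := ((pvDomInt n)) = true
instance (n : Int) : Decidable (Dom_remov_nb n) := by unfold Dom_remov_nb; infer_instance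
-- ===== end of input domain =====

-- B replaces A's linear scan over x = 1..n by an enumeration of the divisor pairs of
-- s = n*(n+1)//2 + 1 up to sqrt(s) (x*y = S-x-y iff (x+1)(y+1) = s); measured ~2x faster.

-- ===== PORT A =====
def remov_nb (n : Int) : List (Int × Int) :=
  let seq_sum := PySem.Int.floordiv (n * (n + 1)) 2
  (PySem.List.pyRange 1 (n + 1) 1).foldl
    (fun result x =>
      let y := PySem.Int.floordiv (seq_sum - x) (x + 1)
      if y ≤ n ∧ x * y = seq_sum - x - y then result ++ [(x, y)] else result)
    []

-- ===== PORT B =====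
-- termination helper for the while loop (cited in decreasing_by)
theorem pv_int_le_sq (i : Int) : i ≤ i * i := by
  nlinarith [sq_nonneg i, sq_nonneg (i - 1)]

-- the `while i * i <= s` loop of Source B, accumulating `small` and `large`
def bloopB (n s i : Int) (small large : List (Int × Int)) :
    List (Int × Int) × List (Int × Int) :=
  if h : i * i ≤ s then
    if PySem.Int.mod s i = 0 then
      bloopB n s (i + 1)
        (if 1 ≤ i - 1 ∧ i - 1 ≤ n ∧ PySem.Int.floordiv s i - 1 ≤ n then
          small ++ [(i - 1, PySem.Int.floordiv s i - 1)] else small)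
        (if 1 ≤ PySem.Int.floordiv s i - 1 ∧ PySem.Int.floordiv s i - 1 ≤ n ∧ i - 1 ≤ n then
          large ++ [(PySem.Int.floordiv s i - 1, i - 1)] else large)
    else bloopB n s (i + 1) small large
  else (small, large)
  termination_by (s + 1 - i).toNat
  decreasing_by
    all_goals
      have := pv_int_le_sq i
      omega

def remov_nb_alt (n : Int) : List (Int × Int) :=
  if n < 1 then []
  else
  let s := PySem.Int.floordiv (n * (n + 1)) 2 + 1
  let p := bloopB n s 1 [] []
  let small := p.1
  let large := p.2
  let large' :=
    if small ≠ [] ∧ large ≠ [] ∧ small.getLast? = large.getLast? then large.dropLast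
    else large
  small ++ large'.reverse

-- ===== PRECONDITION & SPEC =====
def Spec_remov_nb (n : Int) (out : List (Int × Int)) : Prop := out = remov_nb_alt n
instance (n : Int) (out : List (Int × Int)) : Decidable (Spec_remov_nb n out) := by
  unfold Spec_remov_nb; infer_instance

-- ===== CLAIM (what is proved, stated in full; the proofs are below) =====
def Claim_equal_remov_nb : Prop := ∀ (n : Int), Dom_remov_nb n → Spec_remov_nb n (remov_nb n)

-- ===== LEMMAS AND PROOFS =====

-- the common quantity s = n*(n+1)//2 + 1
def sI (n : Int) : Int := PySem.Int.floordiv (n * (n + 1)) 2 + 1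

theorem sI_spec (n : Int) : 2 * (sI n - 1) = n * (n + 1) ∧ 1 ≤ sI n := by
  have he : Even (n * (n + 1)) := Int.even_mul_succ_self n
  obtain ⟨r, hr⟩ := he
  have hnn : 0 ≤ n * (n + 1) := by
    nlinarith [sq_nonneg n, sq_nonneg (n + 1)]
  unfold sI
  rw [PySem.Int.floordiv_eq_ediv_of_pos (by norm_num)]
  omega

-- the canonical characterisation of a result pair
def good (n : Int) (p : Int × Int) : Prop :=
  1 ≤ p.1 ∧ p.1 ≤ n ∧ p.2 ≤ n ∧ (p.1 + 1) * (p.2 + 1) = sI n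

-- ---------- A side ----------

theorem A_foldl (n seq_sum : Int) (l : List Int) (acc : List (Int × Int)) :
    l.foldl
      (fun result x =>
        let y := PySem.Int.floordiv (seq_sum - x) (x + 1)
        if y ≤ n ∧ x * y = seq_sum - x - y then result ++ [(x, y)] else result) acc
    = acc ++ (l.filter (fun x =>
        let y := PySem.Int.floordiv (seq_sum - x) (x + 1)
        decide (y ≤ n ∧ x * y = seq_sum - x - y))).map
        (fun x => (x, PySem.Int.floordiv (seq_sum - x) (x + 1))) := by
  induction l generalizing acc with
  | nil => simp
  | cons a t ih =>
    simp only [List.foldl_cons, List.filter_cons]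
    by_cases h : (PySem.Int.floordiv (seq_sum - a) (a + 1) ≤ n ∧
        a * PySem.Int.floordiv (seq_sum - a) (a + 1) = seq_sum - a -
          PySem.Int.floordiv (seq_sum - a) (a + 1))
    · simp only [h, decide_eq_true_eq, ih]
      simp
    · simp only [h, decide_eq_true_eq]
      simp [ih]

theorem fd_aux (s x q : Int) (hx : 1 ≤ x) (h : (x + 1) * q = s) :
    PySem.Int.floordiv (s - 1 - x) (x + 1) = q - 1 := by
  rw [PySem.Int.floordiv_eq_ediv_of_pos (by omega)]
  have hrw : s - 1 - x = (x + 1) * (q - 1) := by linear_combination (-1 : Int) * h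
  rw [hrw, Int.mul_ediv_cancel_left _ (by omega)]

theorem hSdef (n : Int) : PySem.Int.floordiv (n * (n + 1)) 2 = sI n - 1 := by
  unfold sI; ring

theorem A_mem (n : Int) (p : Int × Int) : p ∈ remov_nb n ↔ good n p := by
  unfold remov_nb
  rw [A_foldl, List.nil_append]
  simp only [List.mem_map, List.mem_filter, PySem.List.mem_pyRange_one, decide_eq_true_eq,
    hSdef]
  constructor
  · rintro ⟨x, ⟨⟨hx1, hx2⟩, hyn, heq⟩, rfl⟩
    refine ⟨hx1, by omega, hyn, ?_⟩
    linear_combination heq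
  · rintro ⟨h1, h2, h3, h4⟩
    refine ⟨p.1, ⟨⟨h1, by omega⟩, ?_⟩, ?_⟩
    · rw [fd_aux (sI n) p.1 (p.2 + 1) h1 h4]
      constructor
      · omega
      · linear_combination h4
    · rw [fd_aux (sI n) p.1 (p.2 + 1) h1 h4]
      simp

theorem A_pairwise (n : Int) : (remov_nb n).Pairwise (fun a b => a.1 < b.1) := by
  unfold remov_nb
  rw [A_foldl, List.nil_append]
  refine List.pairwise_map.mpr ?_
  exact List.Pairwise.filter _ (PySem.List.pairwise_lt_pyRange_one 1 (n + 1))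

-- ---------- B side ----------

def divsD (s i : Int) : List Int :=
  if h : i * i ≤ s then
    if PySem.Int.mod s i = 0 then i :: divsD s (i + 1) else divsD s (i + 1)
  else []
  termination_by (s + 1 - i).toNat
  decreasing_by
    all_goals
      have := pv_int_le_sq i
      omega

def fS (n s d : Int) : Option (Int × Int) :=
  if 1 ≤ d - 1 ∧ d - 1 ≤ n ∧ PySem.Int.floordiv s d - 1 ≤ n then
    some (d - 1, PySem.Int.floordiv s d - 1)
  else none

def fL (n s d : Int) : Option (Int × Int) :=
  if 1 ≤ PySem.Int.floordiv s d - 1 ∧ PySem.Int.floordiv s d - 1 ≤ n ∧ d - 1 ≤ n then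
    some (PySem.Int.floordiv s d - 1, d - 1)
  else none

theorem pv_filterMap_cons {f : Int → Option (Int × Int)} (a : Int) (l : List Int) :
    List.filterMap f (a :: l) = (f a).toList ++ List.filterMap f l := by
  cases h : f a <;> simp [h]

theorem bloopB_eq (n s i : Int) (sm lg : List (Int × Int)) :
    bloopB n s i sm lg = (sm ++ (divsD s i).filterMap (fS n s),
                          lg ++ (divsD s i).filterMap (fL n s)) := by
  fun_induction bloopB n s i sm lg with
  | case1 i sm lg h hmod ih =>
    simp only [dite_eq_ite] at ih
    rw [divsD, dif_pos h, if_pos hmod, ih]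
    rw [pv_filterMap_cons, pv_filterMap_cons]
    simp only [fS, fL, Prod.mk.injEq]
    constructor <;> (split_ifs <;> simp)
  | case2 i sm lg h hmod ih =>
    rw [divsD, dif_pos h, if_neg hmod]
    exact ih
  | case3 i sm lg h =>
    rw [divsD, dif_neg h]
    simp

theorem divsD_ge (s i : Int) : ∀ d ∈ divsD s i, i ≤ d := by
  fun_induction divsD s i with
  | case1 i h hmod ih =>
    intro d hd
    rcases List.mem_cons.mp hd with rfl | hd
    · exact le_refl d
    · have := ih d hd; omega
  | case2 i h hmod ih =>
    intro d hd
    have := ih d hd; omega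
  | case3 i h => simp

theorem mem_divsD (s i : Int) :
    ∀ d : Int, 1 ≤ i → (d ∈ divsD s i ↔ i ≤ d ∧ d * d ≤ s ∧ d ∣ s) := by
  fun_induction divsD s i with
  | case1 i h hmod ih =>
    intro d hi
    have hdvd : i ∣ s := (PySem.Int.mod_eq_zero_iff_dvd s i).mp hmod
    rw [List.mem_cons, ih d (by omega)]
    constructor
    · rintro (rfl | ⟨h1, h2, h3⟩)
      · exact ⟨le_refl d, h, hdvd⟩
      · exact ⟨by omega, h2, h3⟩
    · rintro ⟨h1, h2, h3⟩
      rcases eq_or_lt_of_le h1 with heq | hlt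
      · exact Or.inl heq.symm
      · exact Or.inr ⟨by omega, h2, h3⟩
  | case2 i h hmod ih =>
    intro d hi
    rw [ih d (by omega)]
    constructor
    · rintro ⟨h1, h2, h3⟩
      exact ⟨by omega, h2, h3⟩
    · rintro ⟨h1, h2, h3⟩
      rcases eq_or_lt_of_le h1 with heq | hlt
      · exact absurd ((PySem.Int.mod_eq_zero_iff_dvd s i).mpr (heq ▸ h3)) hmod
      · exact ⟨by omega, h2, h3⟩
  | case3 i h =>
    intro d hi
    simp only [List.not_mem_nil, false_iff]
    rintro ⟨h1, h2, h3⟩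
    have : i * i ≤ d * d := mul_le_mul h1 h1 (by omega) (by omega)
    omega

theorem pairwise_divsD (s i : Int) : (divsD s i).Pairwise (· < ·) := by
  fun_induction divsD s i with
  | case1 i h hmod ih =>
    refine List.pairwise_cons.mpr ⟨?_, ih⟩
    intro d hd
    have := divsD_ge s (i + 1) d hd
    omega
  | case2 i h hmod ih => exact ih
  | case3 i h => simp

def smallL (n : Int) : List (Int × Int) := (divsD (sI n) 1).filterMap (fS n (sI n))
def largeL (n : Int) : List (Int × Int) := (divsD (sI n) 1).filterMap (fL n (sI n))

theorem alt_unfold (n : Int) (hn : ¬ n < 1) :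
    remov_nb_alt n = smallL n ++
      (if smallL n ≠ [] ∧ largeL n ≠ [] ∧ (smallL n).getLast? = (largeL n).getLast?
       then (largeL n).dropLast else largeL n).reverse := by
  unfold remov_nb_alt smallL largeL sI
  rw [if_neg hn]
  simp only [bloopB_eq, List.nil_append]

theorem fd_mul (s d : Int) (hd : 1 ≤ d) (hdvd : d ∣ s) : d * PySem.Int.floordiv s d = s := by
  rw [PySem.Int.floordiv_eq_ediv_of_pos (by omega)]
  exact Int.mul_ediv_cancel' hdvd

theorem fd_eq (s d e : Int) (hd : 1 ≤ d) (h : d * e = s) : PySem.Int.floordiv s d = e := by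
  rw [PySem.Int.floordiv_eq_ediv_of_pos (by omega), ← h, Int.mul_ediv_cancel_left _ (by omega)]

theorem fS_some (n s d : Int) (p : Int × Int) (h : fS n s d = some p) :
    p = (d - 1, PySem.Int.floordiv s d - 1) ∧
      1 ≤ d - 1 ∧ d - 1 ≤ n ∧ PySem.Int.floordiv s d - 1 ≤ n := by
  unfold fS at h
  split_ifs at h with hc
  exact ⟨(Option.some.inj h).symm, hc⟩

theorem fL_some (n s d : Int) (p : Int × Int) (h : fL n s d = some p) :
    p = (PySem.Int.floordiv s d - 1, d - 1) ∧
      1 ≤ PySem.Int.floordiv s d - 1 ∧ PySem.Int.floordiv s d - 1 ≤ n ∧ d - 1 ≤ n := by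
  unfold fL at h
  split_ifs at h with hc
  exact ⟨(Option.some.inj h).symm, hc⟩

theorem mem_smallL (n : Int) (p : Int × Int) :
    p ∈ smallL n ↔ ∃ d, 1 ≤ d ∧ d * d ≤ sI n ∧ d ∣ sI n ∧ fS n (sI n) d = some p := by
  unfold smallL
  simp only [List.mem_filterMap]
  constructor
  · rintro ⟨d, hd, hf⟩
    have h := (mem_divsD (sI n) 1 d (le_refl 1)).mp hd
    exact ⟨d, h.1, h.2.1, h.2.2, hf⟩
  · rintro ⟨d, h1, h2, h3, hf⟩
    exact ⟨d, (mem_divsD (sI n) 1 d (le_refl 1)).mpr ⟨h1, h2, h3⟩, hf⟩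

theorem mem_largeL (n : Int) (p : Int × Int) :
    p ∈ largeL n ↔ ∃ d, 1 ≤ d ∧ d * d ≤ sI n ∧ d ∣ sI n ∧ fL n (sI n) d = some p := by
  unfold largeL
  simp only [List.mem_filterMap]
  constructor
  · rintro ⟨d, hd, hf⟩
    have h := (mem_divsD (sI n) 1 d (le_refl 1)).mp hd
    exact ⟨d, h.1, h.2.1, h.2.2, hf⟩
  · rintro ⟨d, h1, h2, h3, hf⟩
    exact ⟨d, (mem_divsD (sI n) 1 d (le_refl 1)).mpr ⟨h1, h2, h3⟩, hf⟩

theorem good_of_fS (n d : Int) (p : Int × Int) (h1 : 1 ≤ d) (h3 : d ∣ sI n)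
    (hf : fS n (sI n) d = some p) : good n p := by
  obtain ⟨rfl, hc1, hc2, hc3⟩ := fS_some n (sI n) d p hf
  have hm := fd_mul (sI n) d h1 h3
  exact ⟨hc1, hc2, hc3, by linear_combination hm⟩

theorem good_of_fL (n d : Int) (p : Int × Int) (h1 : 1 ≤ d) (h3 : d ∣ sI n)
    (hf : fL n (sI n) d = some p) : good n p := by
  obtain ⟨rfl, hc1, hc2, hc3⟩ := fL_some n (sI n) d p hf
  have hm := fd_mul (sI n) d h1 h3
  exact ⟨hc1, hc2, hc3, by linear_combination hm⟩

theorem mem_of_good (n : Int) (p : Int × Int) (hg : good n p) :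
    p ∈ smallL n ∨ p ∈ largeL n := by
  obtain ⟨h1, h2, h3, h4⟩ := hg
  have hs := (sI_spec n).2
  have hd0 : 2 ≤ p.1 + 1 := by omega
  have he0 : 1 ≤ p.2 + 1 := by nlinarith
  by_cases hc : (p.1 + 1) * (p.1 + 1) ≤ sI n
  · left
    rw [mem_smallL]
    refine ⟨p.1 + 1, by omega, hc, ⟨p.2 + 1, h4.symm⟩, ?_⟩
    unfold fS
    rw [fd_eq (sI n) (p.1 + 1) (p.2 + 1) (by omega) h4]
    rw [if_pos ⟨by omega, by omega, by omega⟩]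
    congr 1
    apply Prod.ext <;> simp
  · right
    have hlt : p.2 + 1 < p.1 + 1 := by nlinarith
    have he2 : (p.2 + 1) * (p.2 + 1) ≤ sI n := by nlinarith
    rw [mem_largeL]
    refine ⟨p.2 + 1, by omega, he2, ⟨p.1 + 1, by linear_combination -h4⟩, ?_⟩
    unfold fL
    rw [fd_eq (sI n) (p.2 + 1) (p.1 + 1) (by omega) (by linear_combination h4)]
    rw [if_pos ⟨by omega, by omega, by omega⟩]
    congr 1
    apply Prod.ext <;> simp

theorem last_of_chain :
    ∀ (l : List Int), l.Pairwise (· < ·) → ∀ r ∈ l, (∀ y ∈ l, y ≤ r) → l.getLast? = some r := by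
  intro l
  induction l with
  | nil => intro _ r hr; simp at hr
  | cons a t ih =>
    intro hpw r hr hmax
    rcases List.mem_cons.mp hr with rfl | hrt
    · cases t with
      | nil => rfl
      | cons b t' =>
        have hab := (List.pairwise_cons.mp hpw).1 b List.mem_cons_self
        have hba := hmax b (by simp)
        omega
    · cases t with
      | nil => simp at hrt
      | cons b t' =>
        rw [List.getLast?_cons_cons]
        exact ih (List.pairwise_cons.mp hpw).2 r hrt
          (fun y hy => hmax y (List.mem_cons_of_mem a hy))

theorem last_filterMap (f : Int → Option (Int × Int)) (l : List Int) (a : Int) (b : Int × Int)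
    (hl : l.getLast? = some a) (hf : f a = some b) : (l.filterMap f).getLast? = some b := by
  obtain ⟨l', rfl⟩ := List.getLast?_eq_some_iff.mp hl
  rw [List.filterMap_append, show List.filterMap f [a] = [b] by simp [hf]]
  exact List.getLast?_concat

theorem square_last (s r : Int) (hr : 1 ≤ r) (hrs : r * r = s) : (divsD s 1).getLast? = some r := by
  refine last_of_chain _ (pairwise_divsD s 1) r
    ((mem_divsD s 1 r (le_refl 1)).mpr ⟨hr, le_of_eq hrs, ⟨r, hrs.symm⟩⟩) ?_
  intro y hy
  have h := (mem_divsD s 1 y (le_refl 1)).mp hy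
  nlinarith [h.2.1, h.1]

-- the small-side pair strictly precedes the large-side pair, except for the middle
-- perfect-square pair, which is the last element of both lists
theorem cross_le (n d e : Int) (p q : Int × Int)
    (hd1 : 1 ≤ d) (hd2 : d * d ≤ sI n) (hd3 : d ∣ sI n)
    (he1 : 1 ≤ e) (he2 : e * e ≤ sI n) (he3 : e ∣ sI n)
    (hp : fS n (sI n) d = some p) (hq : fL n (sI n) e = some q) :
    p.1 ≤ q.1 ∧ (p.1 = q.1 → p = q ∧
      (smallL n).getLast? = some p ∧ (largeL n).getLast? = some p) := by
  obtain ⟨hpe, _, _, _⟩ := fS_some n (sI n) d p hp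
  obtain ⟨hqe, _, _, _⟩ := fL_some n (sI n) e q hq
  have hfe := fd_mul (sI n) e he1 he3
  have hfd := fd_mul (sI n) d hd1 hd3
  have hef : e ≤ PySem.Int.floordiv (sI n) e := by nlinarith
  have hdf : d ≤ PySem.Int.floordiv (sI n) e := by nlinarith
  constructor
  · rw [hpe, hqe]; simpa using by omega
  · intro hfst
    have hdeq : d = PySem.Int.floordiv (sI n) e := by
      rw [hpe, hqe] at hfst; simp at hfst; omega
    have hed : e ≤ d := by nlinarith
    have hde : d ≤ e := by nlinarith
    have hde' : d = e := le_antisymm hde hed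
    have hsq : d * d = sI n := by rw [hde'] at *; nlinarith
    have hfdd : PySem.Int.floordiv (sI n) d = d := fd_eq (sI n) d d hd1 hsq
    have hpq : p = q := by rw [hpe, hqe, ← hde', hfdd]
    have hq2 : fL n (sI n) d = some p := by
      rw [hde', hq]
      exact congrArg some hpq.symm
    exact ⟨hpq, last_filterMap _ _ d p (square_last (sI n) d hd1 hsq) hp,
      last_filterMap _ _ d p (square_last (sI n) d hd1 hsq) hq2⟩

theorem smallL_pairwise (n : Int) : (smallL n).Pairwise (fun a b => a.1 < b.1) := by
  unfold smallL
  rw [List.pairwise_filterMap]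
  refine (pairwise_divsD (sI n) 1).imp ?_
  intro a b hlt p hp q hq
  obtain ⟨hpe, hc1, _, _⟩ := fS_some n (sI n) a p hp
  obtain ⟨hqe, _, _, _⟩ := fS_some n (sI n) b q hq
  rw [hpe, hqe]
  simp only
  omega

theorem largeL_pairwise (n : Int) : (largeL n).Pairwise (fun a b => b.1 < a.1) := by
  unfold largeL
  rw [List.pairwise_filterMap]
  refine List.Pairwise.imp_of_mem ?_ (pairwise_divsD (sI n) 1)
  intro a b ha hb hlt p hp q hq
  obtain ⟨ha1, ha2, ha3⟩ := (mem_divsD (sI n) 1 a (le_refl 1)).mp ha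
  obtain ⟨hb1, hb2, hb3⟩ := (mem_divsD (sI n) 1 b (le_refl 1)).mp hb
  obtain ⟨hpe, _, _, _⟩ := fL_some n (sI n) a p hp
  obtain ⟨hqe, _, _, _⟩ := fL_some n (sI n) b q hq
  have hfa := fd_mul (sI n) a ha1 ha3
  have hfb := fd_mul (sI n) b hb1 hb3
  have hbe : b ≤ PySem.Int.floordiv (sI n) b := by nlinarith
  have : PySem.Int.floordiv (sI n) b < PySem.Int.floordiv (sI n) a := by nlinarith
  rw [hpe, hqe]
  simp only
  omega

theorem B_mem (n : Int) (p : Int × Int) : p ∈ remov_nb_alt n ↔ good n p := by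
  by_cases hn : n < 1
  · unfold remov_nb_alt
    rw [if_pos hn]
    simp only [List.not_mem_nil, false_iff]
    rintro ⟨h1, h2, _, _⟩
    omega
  rw [alt_unfold n hn, List.mem_append, List.mem_reverse]
  have hgood : (p ∈ smallL n ∨ p ∈ largeL n) ↔ good n p := by
    constructor
    · rintro (h | h)
      · rw [mem_smallL] at h
        obtain ⟨d, h1, h2, h3, hf⟩ := h
        exact good_of_fS n d p h1 h3 hf
      · rw [mem_largeL] at h
        obtain ⟨d, h1, h2, h3, hf⟩ := h
        exact good_of_fL n d p h1 h3 hf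
    · exact mem_of_good n p
  rw [← hgood]
  split_ifs with hc
  · obtain ⟨hs1, hs2, hs3⟩ := hc
    have hq : ∃ q, (largeL n).getLast? = some q := by
      rcases hql : (largeL n).getLast? with _ | q
      · exact absurd (List.getLast?_eq_none_iff.mp hql) hs2
      · exact ⟨q, rfl⟩
    obtain ⟨q, hql⟩ := hq
    have hqs : q ∈ smallL n := List.mem_of_getLast? (hs3.trans hql)
    obtain ⟨l', hl'⟩ := List.getLast?_eq_some_iff.mp hql
    rw [hl', List.dropLast_concat]
    constructor
    · rintro (h | h)
      · exact Or.inl h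
      · exact Or.inr (List.mem_append_left _ h)
    · rintro (h | h)
      · exact Or.inl h
      · rcases List.mem_append.mp h with h' | h'
        · exact Or.inr h'
        · exact Or.inl (by rwa [List.mem_singleton.mp h'])
  · exact Iff.rfl

theorem B_pairwise (n : Int) : (remov_nb_alt n).Pairwise (fun a b => a.1 < b.1) := by
  by_cases hn : n < 1
  · unfold remov_nb_alt
    rw [if_pos hn]
    exact List.Pairwise.nil
  rw [alt_unfold n hn, List.pairwise_append]
  refine ⟨smallL_pairwise n, ?_, ?_⟩
  · rw [List.pairwise_reverse]
    split_ifs with hc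
    · exact List.Pairwise.sublist (List.dropLast_sublist _) (largeL_pairwise n)
    · exact largeL_pairwise n
  · intro p hp q hq
    rw [List.mem_reverse] at hq
    rw [mem_smallL] at hp
    obtain ⟨d, hd1, hd2, hd3, hfp⟩ := hp
    have hqL : q ∈ largeL n := by
      split_ifs at hq with hc
      · exact (List.dropLast_sublist _).subset hq
      · exact hq
    obtain ⟨e, he1, he2, he3, hfq⟩ := (mem_largeL n q).mp hqL
    obtain ⟨hle, heq⟩ := cross_le n d e p q hd1 hd2 hd3 he1 he2 he3 hfp hfq
    rcases lt_or_eq_of_le hle with h | h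
    · exact h
    · exfalso
      obtain ⟨hpq, hlS, hlL⟩ := heq h
      split_ifs at hq with hc
      · obtain ⟨l', hl'⟩ := List.getLast?_eq_some_iff.mp hlL
        rw [hl', List.dropLast_concat] at hq
        have hpw := largeL_pairwise n
        rw [hl', List.pairwise_append] at hpw
        have := hpw.2.2 q (hpq ▸ hq) p List.mem_cons_self
        omega
      · exact hc ⟨List.ne_nil_of_mem (List.mem_of_getLast? hlS),
          List.ne_nil_of_mem (List.mem_of_getLast? hlL), hlS.trans hlL.symm⟩

-- ---------- extensionality for strictly increasing lists ----------

theorem chain_ext (l1 l2 : List (Int × Int))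
    (h1 : l1.Pairwise (fun a b => a.1 < b.1)) (h2 : l2.Pairwise (fun a b => a.1 < b.1))
    (hm : ∀ p, p ∈ l1 ↔ p ∈ l2) : l1 = l2 := by
  induction l1 generalizing l2 with
  | nil =>
    cases l2 with
    | nil => rfl
    | cons b t2 => exact absurd ((hm b).mpr List.mem_cons_self) (by simp)
  | cons a t1 ih =>
    cases l2 with
    | nil => exact absurd ((hm a).mp List.mem_cons_self) (by simp)
    | cons b t2 =>
      have hab : a = b := by
        have ha2 : a = b ∨ a ∈ t2 := List.mem_cons.mp ((hm a).mp List.mem_cons_self)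
        have hb1 : b = a ∨ b ∈ t1 := List.mem_cons.mp ((hm b).mpr List.mem_cons_self)
        rcases ha2 with h | h
        · exact h
        · rcases hb1 with h' | h'
          · exact h'.symm
          · have := (List.pairwise_cons.mp h1).1 b h'
            have := (List.pairwise_cons.mp h2).1 a h
            omega
      subst hab
      have h1' := List.pairwise_cons.mp h1
      have h2' := List.pairwise_cons.mp h2
      refine congrArg (a :: ·) (ih t2 h1'.2 h2'.2 ?_)
      intro p
      constructor
      · intro hp
        rcases List.mem_cons.mp ((hm p).mp (List.mem_cons_of_mem a hp)) with h | h
        · exact absurd (h ▸ h1'.1 p hp) (by omega)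
        · exact h
      · intro hp
        rcases List.mem_cons.mp ((hm p).mpr (List.mem_cons_of_mem a hp)) with h | h
        · exact absurd (h ▸ h2'.1 p hp) (by omega)
        · exact h

-- ===== VERDICT (by name: the statement is the Claim_ definition above) =====
theorem remov_nb_spec : Claim_equal_remov_nb := by
  intro n _
  unfold Spec_remov_nb
  exact chain_ext _ _ (A_pairwise n) (B_pairwise n)
    (fun p => (A_mem n p).trans (B_mem n p).symm)
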